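-- pv_equiv track=rewrite | github.com/ofuhrer/HPC4WC | day3/partitioner.py | __cyclic_offset
-- ===== SOURCE A (Python) =====
-- def __cyclic_offset(position, offset, size, periodic=True):
--     """Add offset with cyclic boundary conditions"""
--     pos = position + offset
--     if periodic:
--         while pos < 0:
--             pos += size
--         while pos > size - 1:
--             pos -= size
--     return pos if -1 < pos < size else None
-- ===== SOURCE B (Python) =====
-- def __cyclic_offset(position, offset, size, periodic=True):
--     """Add offset with cyclic boundary conditions"""
--     pos = position + offset
--     if periodic:
--         return pos % size
--     return pos if -1 < pos < size else None
-- ===== Notes on version B (the rewrite author's own statement) =====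
-- stated objective: idiomatic
-- what changed: The two normalising while-loops are replaced by a single Python modulo 'pos % size' returned directly (for size > 0 it is always in range); only the non-periodic case keeps the range test. Pre_ excludes periodic calls with size <= 0, on which A never returns (it loops forever).
import Mathlib
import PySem

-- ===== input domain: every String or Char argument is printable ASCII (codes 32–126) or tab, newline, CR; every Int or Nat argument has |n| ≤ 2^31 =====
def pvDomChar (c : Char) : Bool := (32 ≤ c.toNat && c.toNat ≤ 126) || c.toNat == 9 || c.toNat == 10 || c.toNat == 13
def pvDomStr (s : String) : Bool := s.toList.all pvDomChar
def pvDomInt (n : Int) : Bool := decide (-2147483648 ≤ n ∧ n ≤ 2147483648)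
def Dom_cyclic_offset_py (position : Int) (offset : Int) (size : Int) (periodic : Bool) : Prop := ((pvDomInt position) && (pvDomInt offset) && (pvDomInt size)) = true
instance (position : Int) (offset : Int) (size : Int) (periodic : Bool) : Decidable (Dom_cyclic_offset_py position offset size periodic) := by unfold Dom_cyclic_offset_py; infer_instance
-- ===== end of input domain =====

-- B replaces the two normalising while-loops with one Python modulo and returns it directly (idiomatic, O(1)).

-- ===== PORT A =====
-- 'while pos < 0: pos += size'; the 'size ≤ 0' guard only makes the (otherwise diverging) loop total,
-- such inputs are excluded by Pre_cyclic_offset_py.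
def pvLoopUp (pos size : Int) : Int :=
  if h : size ≤ 0 then pos
  else if pos < 0 then pvLoopUp (pos + size) size
  else pos
termination_by (-pos).toNat
decreasing_by omega

-- 'while pos > size - 1: pos -= size'; same totalising guard.
def pvLoopDown (pos size : Int) : Int :=
  if h : size ≤ 0 then pos
  else if pos > size - 1 then pvLoopDown (pos - size) size
  else pos
termination_by pos.toNat
decreasing_by omega

def cyclic_offset_py (position : Int) (offset : Int) (size : Int) (periodic : Bool) : Option Int :=
  let pos := position + offset
  let pos := if periodic then pvLoopDown (pvLoopUp pos size) size else pos
  if -1 < pos ∧ pos < size then some pos else none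

-- ===== PORT B =====
def cyclic_offset_py_alt (position : Int) (offset : Int) (size : Int) (periodic : Bool) : Option Int :=
  let pos := position + offset
  if periodic then some (PySem.Int.mod pos size)
  else if -1 < pos ∧ pos < size then some pos else none

-- ===== PRECONDITION & SPEC =====
-- Excludes exactly the periodic calls with size ≤ 0: there A's while-loops never terminate
-- (A returns on no such input), and B's 'pos % size' raises or differs.
def Pre_cyclic_offset_py (position : Int) (offset : Int) (size : Int) (periodic : Bool) : Prop :=
  periodic = true → 0 < size
instance (position : Int) (offset : Int) (size : Int) (periodic : Bool) : Decidable (Pre_cyclic_offset_py position offset size periodic) := by unfold Pre_cyclic_offset_py; infer_instance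

def pvWitness_cyclic_offset_py : Int × Int × Int × Bool := (3, -7, 5, true)

def Spec_cyclic_offset_py (position : Int) (offset : Int) (size : Int) (periodic : Bool) (out : Option Int) : Prop := out = cyclic_offset_py_alt position offset size periodic
instance (position : Int) (offset : Int) (size : Int) (periodic : Bool) (out : Option Int) : Decidable (Spec_cyclic_offset_py position offset size periodic out) := by unfold Spec_cyclic_offset_py; infer_instance

-- ===== CLAIM (what is proved, stated in full; the proofs are below) =====
def Claim_equal_cyclic_offset_py : Prop := ∀ (position : Int) (offset : Int) (size : Int) (periodic : Bool), Dom_cyclic_offset_py position offset size periodic → Pre_cyclic_offset_py position offset size periodic → Spec_cyclic_offset_py position offset size periodic (cyclic_offset_py position offset size periodic)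

-- ===== LEMMAS AND PROOFS =====

-- pvLoopUp lands in [0, ∞) for positive size, and preserves the value mod size
theorem pvLoopUp_spec (pos size : Int) (hs : 0 < size) :
    0 ≤ pvLoopUp pos size ∧ pvLoopUp pos size % size = pos % size := by
  fun_induction pvLoopUp pos size with
  | case1 => omega
  | case2 pos hs' hneg ih => simpa [Int.add_mul_emod_self_left] using ih
  | case3 => omega

theorem pvLoopDown_spec (pos size : Int) (hs : 0 < size) (h0 : 0 ≤ pos) :
    (0 ≤ pvLoopDown pos size ∧ pvLoopDown pos size < size) ∧
      pvLoopDown pos size % size = pos % size := by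
  fun_induction pvLoopDown pos size with
  | case1 => omega
  | case2 pos hs' hgt ih =>
      have := ih (by omega)
      simpa [Int.sub_emod_right] using this
  | case3 => omega

theorem pvNorm_eq_mod (pos size : Int) (hs : 0 < size) :
    pvLoopDown (pvLoopUp pos size) size = pos % size := by
  obtain ⟨h1, h2⟩ := pvLoopUp_spec pos size hs
  obtain ⟨⟨h3, h4⟩, h5⟩ := pvLoopDown_spec (pvLoopUp pos size) size hs h1
  calc pvLoopDown (pvLoopUp pos size) size
      = pvLoopDown (pvLoopUp pos size) size % size := (Int.emod_eq_of_lt h3 h4).symm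
    _ = pos % size := by rw [h5, h2]

-- ===== VERDICT (by name: the statement is the Claim_ definition above) =====
theorem cyclic_offset_py_spec : Claim_equal_cyclic_offset_py := by
  intro position offset size periodic _ hpre
  unfold Spec_cyclic_offset_py cyclic_offset_py cyclic_offset_py_alt
  cases periodic with
  | false => simp
  | true =>
    have hs : 0 < size := hpre rfl
    simp only [if_true]
    rw [pvNorm_eq_mod _ _ hs, PySem.Int.mod_eq_emod_of_pos hs]
    have h0 := Int.emod_nonneg (position + offset) (by omega : size ≠ 0)
    have h1 := Int.emod_lt_of_pos (position + offset) hs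
    rw [if_pos ⟨by omega, h1⟩]
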